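-- pv_equiv track=rewrite | github.com/eligoldweber/llvm_non_interference_proofs | tools/convertToDafny.py | formatIns
-- ===== SOURCE A (Python) =====
-- def formatIns(ins):
-- 	formattedIns = []
-- 	for i in range(len(ins)):
-- 		if((ins[0] == "UNCONDBR" or ins[0] == "br")):
-- 			if(len(ins) > 3 and i==1):
-- 				iFormat = ins[i].replace('%',"var_").replace(".","_")
-- 			else:
-- 				iFormat = ins[i].replace('%',"").replace(".","_")
-- 		else:
-- 			iFormat = ins[i].replace('%',"var_").replace('@',"var_").replace(".","_")
-- 		formattedIns.append(iFormat)
-- 	return formattedIns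
-- ===== SOURCE B (Python) =====
-- def _translate(tok, table):
--     return ''.join(table.get(c, c) for c in tok)
--
-- def formatIns(ins):
--     if not ins:
--         return []
--     if ins[0] in ("UNCONDBR", "br"):
--         big = len(ins) > 3
--         return [_translate(tok, {'%': ("var_" if big and i == 1 else ""), '.': "_"})
--                 for i, tok in enumerate(ins)]
--     return [_translate(tok, {'%': "var_", '@': "var_", '.': "_"}) for tok in ins]
-- ===== Notes on version B (the rewrite author's own statement) =====
-- stated objective: alternative
-- what changed: B replaces A's chained whole-string .replace() passes (three re-scans per token inside an index loop that re-tests ins[0] each iteration) with a translation-table algorithm: the head test is decided once, each token is scanned character by character exactly once, and each character is mapped through a per-case dict; correct because every pattern is a single character and no replacement string contains a character that a later replace pass rewrites.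
import Mathlib
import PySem

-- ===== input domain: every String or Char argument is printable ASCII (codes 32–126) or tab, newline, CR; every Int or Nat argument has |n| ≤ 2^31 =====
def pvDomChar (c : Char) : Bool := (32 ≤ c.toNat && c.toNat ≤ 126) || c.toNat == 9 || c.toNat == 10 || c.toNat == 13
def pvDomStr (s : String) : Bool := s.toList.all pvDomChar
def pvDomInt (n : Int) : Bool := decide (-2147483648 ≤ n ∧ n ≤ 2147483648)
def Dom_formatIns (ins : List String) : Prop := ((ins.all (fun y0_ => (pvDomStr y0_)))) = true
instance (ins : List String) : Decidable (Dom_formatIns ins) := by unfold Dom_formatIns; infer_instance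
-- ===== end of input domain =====

-- B replaces A's chained whole-string replace passes with a single per-character scan through a translation table dict; same results.

-- ===== PORT A =====
-- literal transliteration: index loop over range(len(ins)), re-testing ins[0] per iteration, chained .replace
def formatIns (ins : List String) : List String :=
  (PySem.List.pyRange 0 ins.length 1).foldl (fun formattedIns i =>
    let iFormat :=
      if PySem.List.pyGetD ins 0 "" == "UNCONDBR" || PySem.List.pyGetD ins 0 "" == "br" then
        if ins.length > 3 && i == 1 then
          PySem.Str.replace (PySem.Str.replace (PySem.List.pyGetD ins i "") "%" "var_") "." "_"
        else
          PySem.Str.replace (PySem.Str.replace (PySem.List.pyGetD ins i "") "%" "") "." "_"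
      else
        PySem.Str.replace (PySem.Str.replace (PySem.Str.replace (PySem.List.pyGetD ins i "") "%" "var_") "@" "var_") "." "_"
    formattedIns ++ [iFormat]) []

-- ===== PORT B =====
-- B's helper _translate: one pass over the token's characters, each mapped through the table dict
def pvTranslate (tok : String) (table : PySem.Dict Char String) : String :=
  PySem.Str.join "" (tok.toList.map (fun c => table.getD c (String.ofList [c])))

def formatIns_alt (ins : List String) : List String :=
  match ins with
  | [] => []
  | t0 :: _ =>
    if t0 == "UNCONDBR" || t0 == "br" then
      (PySem.List.enumerate ins 0).map (fun p =>
        pvTranslate p.2 (PySem.Dict.ofList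
          [('%', if ins.length > 3 && p.1 == 1 then "var_" else ""), ('.', "_")]))
    else
      ins.map (fun t =>
        pvTranslate t (PySem.Dict.ofList [('%', "var_"), ('@', "var_"), ('.', "_")]))

-- ===== PRECONDITION & SPEC =====
def Spec_formatIns (ins : List String) (out : List String) : Prop := out = formatIns_alt ins
instance (ins : List String) (out : List String) : Decidable (Spec_formatIns ins out) := by unfold Spec_formatIns; infer_instance

-- ===== CLAIM (what is proved, stated in full; the proofs are below) =====
def Claim_equal_formatIns : Prop := ∀ (ins : List String), Dom_formatIns ins → Spec_formatIns ins (formatIns ins)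

-- ===== LEMMAS AND PROOFS =====

-- replace with a single-character pattern is a per-character flatMap
lemma pvGoSingle (c : Char) (nw : List Char) :
    ∀ (fuel : Nat) (l acc : List Char), l.length ≤ fuel →
      PySem.Chars.replace.go [c] nw fuel l acc
        = acc.reverse ++ l.flatMap (fun x => if x = c then nw else [x]) := by
  intro fuel
  induction fuel with
  | zero =>
    intro l acc h
    have : l = [] := List.length_eq_zero_iff.mp (Nat.le_zero.mp h)
    subst this; simp [PySem.Chars.replace.go]
  | succ n ih =>
    intro l acc h
    cases l with
    | nil => simp [PySem.Chars.replace.go]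
    | cons x t =>
      simp only [PySem.Chars.replace.go]
      by_cases hx : x = c
      · subst hx
        simp [List.isPrefixOf, ih t _ (by simpa using Nat.le_of_succ_le_succ h)]
      · simp [List.isPrefixOf, hx, ih t _ (by simpa using Nat.le_of_succ_le_succ h)]
        intro h'; exact absurd h'.symm hx

lemma pvReplaceSingle (c : Char) (nw : List Char) (s : List Char) :
    PySem.Chars.replace s [c] nw = s.flatMap (fun x => if x = c then nw else [x]) := by
  simp [PySem.Chars.replace, pvGoSingle c nw s.length s [] (le_refl _)]

lemma pvJoinNilFlatten (L : List (List Char)) : PySem.Chars.join [] L = L.flatten := by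
  induction L with
  | nil => simp [PySem.Chars.join_nil]
  | cons a t ih =>
    cases t with
    | nil => simp [PySem.Chars.join_singleton]
    | cons b r => simp [PySem.Chars.join_cons_cons, ih]

-- translate unfolded to a flatMap on the character list
lemma pvTranslate_toList (tok : String) (table : PySem.Dict Char String) :
    (pvTranslate tok table).toList
      = tok.toList.flatMap (fun c => (table.getD c (String.ofList [c])).toList) := by
  simp [pvTranslate, PySem.Str.toList_join, List.map_map, pvJoinNilFlatten,
    List.flatMap_def, Function.comp_def]

-- token-level equalities -----------------------------------------------------

lemma pvTokBranch (t r : String) (hr : r = "var_" ∨ r = "") :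
    PySem.Str.replace (PySem.Str.replace t "%" r) "." "_"
      = pvTranslate t (PySem.Dict.ofList [('%', r), ('.', "_")]) := by
  refine String.toList_inj.mp ?_
  rw [pvTranslate_toList]
  simp only [PySem.Str.toList_replace]
  have h1 : ("%" : String).toList = ['%'] := rfl
  have h2 : ("." : String).toList = ['.'] := rfl
  rw [h1, h2, pvReplaceSingle, pvReplaceSingle, List.flatMap_assoc]
  congr 1
  funext c
  have hd : PySem.Dict.ofList [('%', r), ('.', "_")]
      = ((PySem.Dict.empty).insert '%' r).insert '.' "_" := rfl
  by_cases hp : c = '%'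
  · subst hp
    rcases hr with h | h <;> subst h <;> decide
  · by_cases hq : c = '.'
    · subst hq; simp [hd]
    · simp [hp, hq, hd, PySem.Dict.getD_insert, PySem.Dict.getD_empty]

lemma pvTokOther (t : String) :
    PySem.Str.replace (PySem.Str.replace (PySem.Str.replace t "%" "var_") "@" "var_") "." "_"
      = pvTranslate t (PySem.Dict.ofList [('%', "var_"), ('@', "var_"), ('.', "_")]) := by
  refine String.toList_inj.mp ?_
  rw [pvTranslate_toList]
  simp only [PySem.Str.toList_replace]
  have h1 : ("%" : String).toList = ['%'] := rfl
  have h2 : ("@" : String).toList = ['@'] := rfl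
  have h3 : ("." : String).toList = ['.'] := rfl
  rw [h1, h2, h3, pvReplaceSingle, pvReplaceSingle, pvReplaceSingle,
      List.flatMap_assoc, List.flatMap_assoc]
  congr 1
  funext c
  have hd : PySem.Dict.ofList [('%', "var_"), ('@', "var_"), ('.', "_")]
      = (((PySem.Dict.empty).insert '%' "var_").insert '@' "var_").insert '.' "_" := rfl
  by_cases hp : c = '%'
  · subst hp; decide
  · by_cases ha : c = '@'
    · subst ha; decide
    · by_cases hq : c = '.'
      · subst hq; decide
      · simp [hp, ha, hq, hd, PySem.Dict.getD_insert, PySem.Dict.getD_empty]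

-- list-level assembly ---------------------------------------------------------

theorem pvFormatInsEq (ins : List String) : formatIns ins = formatIns_alt ins := by
  cases ins with
  | nil => rfl
  | cons t0 rest =>
    have h0 : PySem.List.pyGetD (t0 :: rest) 0 "" = t0 := by
      simp [PySem.List.pyGetD, PySem.List.pyGet?, PySem.List.pyIdx?]
    unfold formatIns formatIns_alt
    rw [PySem.List.foldl_append_singleton_eq_map, List.nil_append]
    simp only [h0]
    by_cases hbr : (t0 == "UNCONDBR" || t0 == "br") = true
    · simp only [hbr, if_true]
      rw [PySem.List.enumerate_eq_map_pyRange (d := ""), List.map_map]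
      refine List.map_congr_left (fun i _ => ?_)
      simp only [Function.comp]
      by_cases hc : ((t0 :: rest).length > 3 && i == 1) = true
      · simp only [hc, if_true]
        exact pvTokBranch _ _ (Or.inl rfl)
      · simp only [hc, if_false, Bool.false_eq_true]
        exact pvTokBranch _ _ (Or.inr rfl)
    · simp only [hbr, if_false, Bool.false_eq_true]
      conv_rhs => rw [← PySem.List.map_pyGetD_pyRange_zero' (xs := t0 :: rest) (d := ""), List.map_map]
      exact List.map_congr_left (fun i _ => pvTokOther _)

-- ===== VERDICT (by name: the statement is the Claim_ definition above) =====
theorem formatIns_spec : Claim_equal_formatIns := by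
  intro ins _
  exact pvFormatInsEq ins
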